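-- pv_equiv track=rewrite | github.com/giuscri/problem-solving-workout | google_code_jam/all_your_base/all_your_base.py | compute_map
-- ===== SOURCE A (Python) =====
-- import string
--
-- def compute_map(s, m):
-- 	if s == '':
-- 		r = {}
-- 		for k, v in m.items():
-- 			if v < 10:
-- 				r[k] = str(v)
-- 			elif (v - 10) < 26:
-- 				r[k] = string.printable[10:10+26][v - 10]
-- 			else:
-- 				raise Exception('Map m={} cannot be used'.format(m))
--
-- 		return r
--
-- 	for i in range(0, 36):
-- 		if s[0] in m: continue
-- 		if i in m.values(): continue
-- 		m[s[0]] = i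
-- 		break
--
-- 	return compute_map(s[1:], m)
-- ===== SOURCE B (Python) =====
-- import string
--
--
-- def compute_map(s, m):
--     # One pass over s with a grown-only set of used values and a monotone
--     # "next free value" pointer, instead of A's per-char 36-step scan of
--     # m.values(); mutates m in place exactly like A.
--     used = set(m.values())
--     nxt = 0
--     for ch in s:
--         if ch in m:
--             continue
--         while nxt < 36 and nxt in used:
--             nxt += 1
--         if nxt < 36:
--             m[ch] = nxt
--             used.add(nxt)
--             nxt += 1
--     r = {}
--     for k, v in m.items():
--         if v >= 36:
--             raise Exception('Map m={} cannot be used'.format(m))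
--         r[k] = str(v) if v < 10 else string.ascii_lowercase[v - 10]
--     return r
-- ===== Notes on version B (the rewrite author's own statement) =====
-- stated objective: faster
-- what changed: Replaces A's recursion on s[1:] with one explicit pass over s that keeps a grown-only set of used values and a monotone next-free-value pointer, so the per-character scan of range(36) against m.values() disappears; the result dict is then built in a single loop.
import Mathlib
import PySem

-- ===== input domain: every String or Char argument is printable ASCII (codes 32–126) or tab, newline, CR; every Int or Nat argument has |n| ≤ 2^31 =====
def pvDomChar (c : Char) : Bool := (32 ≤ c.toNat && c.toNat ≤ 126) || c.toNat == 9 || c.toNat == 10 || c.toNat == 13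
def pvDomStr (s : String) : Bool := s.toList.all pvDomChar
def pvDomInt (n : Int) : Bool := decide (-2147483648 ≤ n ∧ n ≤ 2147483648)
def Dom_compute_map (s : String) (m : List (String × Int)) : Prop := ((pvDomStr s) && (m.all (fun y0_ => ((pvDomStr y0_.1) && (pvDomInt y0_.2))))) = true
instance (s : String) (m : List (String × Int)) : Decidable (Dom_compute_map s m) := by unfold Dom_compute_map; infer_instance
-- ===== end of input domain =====

-- B replaces A's per-character scan of range(36) against m.values() by a grown-only
-- used-value set with a monotone next-free-value pointer (objective: faster).
-- Both Pythons mutate the dict m in place in the same way; the equivalence proved here is about the return value.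

-- ===== PORT A =====
-- string.printable[10:10+26]
def pvLetters : List Char := ['a','b','c','d','e','f','g','h','i','j','k','l','m','n','o','p','q','r','s','t','u','v','w','x','y','z']

-- base case: build r from m.items() (the 'else' branch is Python's raise, excluded by Pre_;
-- the pyGetD index kv.2 - 10 is always in range inside its branch, so the default ' ' is never used)
def pvBaseA (m : PySem.Dict String Int) : PySem.Dict String String :=
  m.items.foldl (fun r kv =>
    if kv.2 < 10 then r.insert kv.1 (PySem.Int.toStr kv.2)
    else if kv.2 - 10 < 26 then r.insert kv.1 (String.ofList [PySem.List.pyGetD pvLetters (kv.2 - 10) ' '])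
    else r)  -- raise Exception(...): unreachable under Pre_
    PySem.Dict.empty

-- the 'for i in range(0, 36): … break' loop (second state component = "broke out")
def pvStepA (c : String) (m : PySem.Dict String Int) : PySem.Dict String Int :=
  ((PySem.List.pyRange 0 36 1).foldl (fun st i =>
    if st.2 then st
    else if st.1.contains c then st
    else if st.1.values.contains i then st
    else (st.1.insert c i, true)) (m, false)).1

-- the recursion of A, on s as its list of characters (s[0] / s[1:])
def pvGoA : List Char → PySem.Dict String Int → PySem.Dict String String
  | [], m => pvBaseA m
  | c :: cs, m => pvGoA cs (pvStepA (String.ofList [c]) m)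

def compute_map (s : String) (m : List (String × Int)) : List (String × String) :=
  (pvGoA s.toList (PySem.Dict.mk m)).items

-- ===== PORT B =====
-- while nxt < 36 and nxt in used: nxt += 1
def pvAdvance (used : PySem.Set Int) (nxt : Int) : Int :=
  if h : nxt < 36 ∧ used.contains nxt then pvAdvance used (nxt + 1) else nxt
termination_by (36 - nxt).toNat
decreasing_by omega

-- r-building loop of B (the 'raise' branch is excluded by Pre_)
def pvBaseB (m : PySem.Dict String Int) : PySem.Dict String String :=
  m.items.foldl (fun r kv =>
    if kv.2 ≥ 36 then r  -- raise Exception(...): unreachable under Pre_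
    else r.insert kv.1 (if kv.2 < 10 then PySem.Int.toStr kv.2
                        else String.ofList [PySem.List.pyGetD pvLetters (kv.2 - 10) ' ']))
    PySem.Dict.empty

-- body of B's 'for ch in s' loop; state = (m, used, nxt)
def pvStepB (st : PySem.Dict String Int × PySem.Set Int × Int) (c : Char) :
    PySem.Dict String Int × PySem.Set Int × Int :=
  let key := String.ofList [c]
  if st.1.contains key then st
  else
    let n := pvAdvance st.2.1 st.2.2
    if n < 36 then (st.1.insert key n, PySem.Set.add st.2.1 n, n + 1)
    else (st.1, st.2.1, n)

def compute_map_alt (s : String) (m : List (String × Int)) : List (String × String) :=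
  let m0 : PySem.Dict String Int := PySem.Dict.mk m
  let st := s.toList.foldl pvStepB (m0, PySem.Set.ofList m0.values, 0)
  (pvBaseB st.1).items

-- ===== PRECONDITION & SPEC =====
-- Pre_ excludes exactly the inputs on which Python A raises: a dict with a value ≥ 36.
def Pre_compute_map (s : String) (m : List (String × Int)) : Prop :=
  ∀ kv ∈ m, kv.2 < 36
instance (s : String) (m : List (String × Int)) : Decidable (Pre_compute_map s m) := by
  unfold Pre_compute_map; infer_instance

def pvWitness_compute_map : String × (List (String × Int)) := ("ba!", [("a", 3), ("q", 35)])

def Spec_compute_map (s : String) (m : List (String × Int)) (out : List (String × String)) : Prop := out = compute_map_alt s m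
instance (s : String) (m : List (String × Int)) (out : List (String × String)) : Decidable (Spec_compute_map s m out) := by unfold Spec_compute_map; infer_instance

-- ===== CLAIM (what is proved, stated in full; the proofs are below) =====
def Claim_equal_compute_map : Prop := ∀ (s : String) (m : List (String × Int)), Dom_compute_map s m → Pre_compute_map s m → Spec_compute_map s m (compute_map s m)

-- ===== LEMMAS AND PROOFS =====

-- the body of pvStepA's range(36) fold, named for the lemmas below
def pvA (c : String) := fun (st : PySem.Dict String Int × Bool) (i : Int) =>
    if st.2 then st
    else if st.1.contains c then st
    else if st.1.values.contains i then st
    else (st.1.insert c i, true)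

theorem pvA_after_break (c : String) (l : List Int) (st : PySem.Dict String Int × Bool)
    (h : st.2 = true) : l.foldl (pvA c) st = st := by
  induction l generalizing st with
  | nil => rfl
  | cons i t ih => rw [List.foldl_cons]; rw [show pvA c st i = st by simp [pvA, h]]; exact ih st h

theorem stepA_of_contains (c : String) (m : PySem.Dict String Int) (h : m.contains c = true) :
    pvStepA c m = m := by
  show ((PySem.List.pyRange 0 36 1).foldl (pvA c) (m, false)).1 = m
  have : ∀ l : List Int, l.foldl (pvA c) (m, false) = (m, false) := by
    intro l
    induction l with
    | nil => rfl
    | cons i t ih => rw [List.foldl_cons]; rw [show pvA c (m, false) i = (m, false) by simp [pvA, h]]; exact ih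
  rw [this]

theorem stepA_of_not_contains (c : String) (m : PySem.Dict String Int) (h : m.contains c = false) :
    pvStepA c m =
      match (PySem.List.pyRange 0 36 1).find? (fun i => !(m.values.contains i)) with
      | some i => m.insert c i
      | none => m := by
  show ((PySem.List.pyRange 0 36 1).foldl (pvA c) (m, false)).1 = _
  have : ∀ l : List Int, l.foldl (pvA c) (m, false) =
      match l.find? (fun i => !(m.values.contains i)) with
      | some i => (m.insert c i, true)
      | none => (m, false) := by
    intro l
    induction l with
    | nil => rfl
    | cons i t ih =>
      rw [List.foldl_cons, List.find?_cons]
      cases hv : m.values.contains i with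
      | true =>
        have hm : i ∈ m.values := by simpa using hv
        rw [show pvA c (m, false) i = (m, false) by simp [pvA, h, hm]]
        simp only [Bool.not_true]; exact ih
      | false =>
        have hm : i ∉ m.values := by simpa using hv
        rw [show pvA c (m, false) i = (m.insert c i, true) by simp [pvA, h, hm]]
        simp only [Bool.not_false]
        exact pvA_after_break c t _ rfl
  rw [this]
  cases (PySem.List.pyRange 0 36 1).find? (fun i => !(m.values.contains i)) <;> rfl

theorem pvAdvance_spec (used : PySem.Set Int) (nxt : Int) (h0 : 0 ≤ nxt) (h36 : nxt ≤ 36) :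
    nxt ≤ pvAdvance used nxt ∧ pvAdvance used nxt ≤ 36 ∧
    (∀ j, nxt ≤ j → j < pvAdvance used nxt → used.contains j = true) ∧
    (pvAdvance used nxt < 36 → used.contains (pvAdvance used nxt) = false) := by
  rw [pvAdvance]
  split
  case isTrue h =>
    have IH := pvAdvance_spec used (nxt + 1) (by omega) (by omega)
    refine ⟨by omega, IH.2.1, ?_, IH.2.2.2⟩
    intro j hj1 hj2
    rcases eq_or_lt_of_le hj1 with rfl | hl
    · exact h.2
    · exact IH.2.2.1 j (by omega) hj2
  case isFalse h =>
    refine ⟨le_refl _, h36, by omega, ?_⟩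
    intro hlt
    rcases hc : used.contains nxt with _ | _
    · rfl
    · exact absurd ⟨hlt, hc⟩ h
termination_by (36 - nxt).toNat
decreasing_by omega

theorem find?_range36_some (p : Int → Bool) (n : Int) (h0 : 0 ≤ n) (h36 : n < 36)
    (hlow : ∀ j, 0 ≤ j → j < n → p j = false) (hn : p n = true) :
    (PySem.List.pyRange 0 36 1).find? p = some n := by
  rw [PySem.List.pyRange_one_append 0 n 36 h0 (by omega), List.find?_append]
  have h1 : (PySem.List.pyRange 0 n 1).find? p = none := by
    rw [List.find?_eq_none]
    intro j hj
    have := (PySem.List.mem_pyRange_one).mp hj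
    simp [hlow j this.1 this.2]
  rw [h1, PySem.List.pyRange_one_cons h36, List.find?_cons, hn]
  rfl

theorem find?_range36_none (p : Int → Bool) (hlow : ∀ j, 0 ≤ j → j < 36 → p j = false) :
    (PySem.List.pyRange 0 36 1).find? p = none := by
  rw [List.find?_eq_none]
  intro j hj
  have := (PySem.List.mem_pyRange_one).mp hj
  simp [hlow j this.1 this.2]

-- values of an insert at a fresh key
theorem values_insert_fresh (m : PySem.Dict String Int) (c : String) (i : Int)
    (h : m.contains c = false) : (m.insert c i).values = m.values ++ [i] := by
  simp only [PySem.Dict.values, PySem.Dict.items_insert_of_not_contains m i h, List.map_append,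
    List.map_cons, List.map_nil]

-- set(xs) and xs agree on membership
theorem ofList_contains (l : List Int) : ∀ i : Int, (PySem.Set.ofList l).contains i = l.contains i := by
  intro i
  simp [PySem.Set.contains, PySem.Set.mem_ofList]

-- the main loop invariant: B's one-pass fold computes exactly A's per-character folds
theorem pv_loop (cs : List Char) (m : PySem.Dict String Int) (used : PySem.Set Int) (nxt : Int)
    (hused : ∀ i : Int, used.contains i = m.values.contains i)
    (h0 : 0 ≤ nxt) (h36 : nxt ≤ 36)
    (hlow : ∀ j : Int, 0 ≤ j → j < nxt → m.values.contains j = true) :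
    (cs.foldl pvStepB (m, used, nxt)).1 = cs.foldl (fun m c => pvStepA (String.ofList [c]) m) m := by
  induction cs generalizing m used nxt with
  | nil => rfl
  | cons c cs ih =>
    rw [List.foldl_cons, List.foldl_cons]
    cases hc : m.contains (String.ofList [c]) with
    | true =>
      rw [stepA_of_contains _ _ hc, show pvStepB (m, used, nxt) c = (m, used, nxt) by
        simp [pvStepB, hc]]
      exact ih m used nxt hused h0 h36 hlow
    | false =>
      have hadv := pvAdvance_spec used nxt h0 h36
      set n := pvAdvance used nxt with hn
      have hBstep : pvStepB (m, used, nxt) c =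
          if n < 36 then (m.insert (String.ofList [c]) n, PySem.Set.add used n, n + 1)
          else (m, used, n) := by
        simp [pvStepB, hc, ← hn]
      by_cases hlt : n < 36
      · -- a fresh value n is assigned by both programs
        have hnotin : m.values.contains n = false := by rw [← hused]; exact hadv.2.2.2 hlt
        have hAstep : pvStepA (String.ofList [c]) m = m.insert (String.ofList [c]) n := by
          rw [stepA_of_not_contains _ _ hc,
            find?_range36_some _ n (by omega) hlt
              (by intro j hj0 hjn
                  by_cases hjx : j < nxt
                  · simp only [hlow j hj0 hjx, Bool.not_true]
                  · have := hadv.2.2.1 j (by omega) hjn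
                    rw [hused] at this
                    simp only [this, Bool.not_true])
              (by simp only [hnotin, Bool.not_false])]
      -- new invariants for the inserted state
        rw [hBstep, if_pos hlt, hAstep]
        have hvals := values_insert_fresh m (String.ofList [c]) n hc
        refine ih _ _ _ ?_ (by omega) (by omega) ?_
        · intro i
          rw [hvals]
          have hnu : n ∉ used := by
            have hnu' : used.contains n = false := by rw [hused]; exact hnotin
            simpa [PySem.Set.contains] using hnu'
          rw [show PySem.Set.add used n = used ++ [n] by simp [PySem.Set.add, PySem.Set.contains, hnu]]
          simp only [PySem.Set.contains] at hused ⊢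
          rw [List.contains_append, List.contains_append, hused]
        · intro j hj0 hjn
          rw [hvals]
          rw [List.contains_append]
          simp only [Bool.or_eq_true]
          by_cases hjx : j < nxt
          · exact Or.inl (hlow j hj0 hjx)
          · by_cases hje : j = n
            · subst hje; right; simp
            · left; rw [← hused]; exact hadv.2.2.1 j (by omega) (by omega)
      · -- all 36 values are taken: both programs skip the character
        have hn36 : n = 36 := by omega
        have hAstep : pvStepA (String.ofList [c]) m = m := by
          rw [stepA_of_not_contains _ _ hc,
            find?_range36_none _ (by
              intro j hj0 hj36
              by_cases hjx : j < nxt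
              · simp only [hlow j hj0 hjx, Bool.not_true]
              · have := hadv.2.2.1 j (by omega) (by omega)
                rw [hused] at this
                simp only [this, Bool.not_true])]
        rw [hBstep, if_neg hlt, hAstep]
        refine ih m used n hused (by omega) (by omega) ?_
        intro j hj0 hjn
        by_cases hjx : j < nxt
        · exact hlow j hj0 hjx
        · rw [← hused]; exact hadv.2.2.1 j (by omega) (by omega)

-- values stay below 36 through A's per-character step
theorem stepA_values_lt (c : String) (m : PySem.Dict String Int)
    (hval : ∀ v ∈ m.values, v < 36) : ∀ v ∈ (pvStepA c m).values, v < 36 := by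
  cases hc : m.contains c with
  | true => rw [stepA_of_contains _ _ hc]; exact hval
  | false =>
    rw [stepA_of_not_contains _ _ hc]
    cases hf : (PySem.List.pyRange 0 36 1).find? (fun i => !(m.values.contains i)) with
    | none => exact hval
    | some i =>
      have hi : i ∈ PySem.List.pyRange 0 36 1 := List.mem_of_find?_eq_some hf
      have := (PySem.List.mem_pyRange_one).mp hi
      intro v hv
      rw [values_insert_fresh m c i hc, List.mem_append] at hv
      rcases hv with hv | hv
      · exact hval v hv
      · simp at hv; omega

theorem foldA_values_lt (cs : List Char) (m : PySem.Dict String Int)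
    (hval : ∀ v ∈ m.values, v < 36) :
    ∀ v ∈ (cs.foldl (fun m c => pvStepA (String.ofList [c]) m) m).values, v < 36 := by
  induction cs generalizing m with
  | nil => exact hval
  | cons c cs ih => exact ih _ (stepA_values_lt _ _ hval)

-- with every value below 36 the two result-building loops coincide
theorem base_eq (m : PySem.Dict String Int) (hval : ∀ v ∈ m.values, v < 36) :
    pvBaseA m = pvBaseB m := by
  unfold pvBaseA pvBaseB
  apply PySem.List.foldl_congr_mem
  intro r kv hkv
  have hv : kv.2 < 36 := hval kv.2 (List.mem_map_of_mem hkv)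
  split_ifs <;> first | rfl | omega

theorem goA_eq (cs : List Char) (m : PySem.Dict String Int) :
    pvGoA cs m = pvBaseA (cs.foldl (fun m c => pvStepA (String.ofList [c]) m) m) := by
  induction cs generalizing m with
  | nil => rfl
  | cons c cs ih => rw [pvGoA, List.foldl_cons, ih]

-- ===== VERDICT (by name: the statement is the Claim_ definition above) =====
theorem compute_map_spec : Claim_equal_compute_map := by
  intro s m _ hpre
  unfold Spec_compute_map
  show (pvGoA s.toList (PySem.Dict.mk m)).items =
    (pvBaseB (List.foldl pvStepB
      (PySem.Dict.mk m, PySem.Set.ofList (PySem.Dict.mk m).values, 0) s.toList).1).items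
  have hval : ∀ v ∈ (PySem.Dict.mk m).values, v < 36 := by
    intro v hv
    simp only [PySem.Dict.values, List.mem_map] at hv
    obtain ⟨kv, hkv, rfl⟩ := hv
    exact hpre kv hkv
  have hfold := pv_loop s.toList (PySem.Dict.mk m) (PySem.Set.ofList (PySem.Dict.mk m).values) 0
      (ofList_contains _) le_rfl (by omega) (by intro j hj0 hj; omega)
  have hv36 := foldA_values_lt s.toList (PySem.Dict.mk m) hval
  rw [← hfold] at hv36
  rw [goA_eq, ← hfold, base_eq _ hv36]
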